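-- pv_equiv track=rewrite | github.com/paulosevero/thea | simulation/helper_methods.py | find_minimum_and_maximum
-- ===== SOURCE A (Python) =====
-- def find_minimum_and_maximum(metadata: list):
--     """Finds the minimum and maximum values of a list of dictionaries.
--
--     Args:
--         metadata (list): List of dictionaries that contains the analyzed metadata.
--
--     Returns:
--         min_and_max (dict): Dictionary that contains the minimum and maximum values of the attributes.
--     """
--     min_and_max = {
--         "minimum": {},
--         "maximum": {},
--     }
--
--     for metadata_item in metadata:
--         for attr_name, attr_value in metadata_item.items():
--             if attr_name != "object":
--                 # Updating the attribute's minimum value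
--                 if (
--                     attr_name not in min_and_max["minimum"]
--                     or attr_name in min_and_max["minimum"]
--                     and attr_value < min_and_max["minimum"][attr_name]
--                 ):
--                     min_and_max["minimum"][attr_name] = attr_value
--
--                 # Updating the attribute's maximum value
--                 if (
--                     attr_name not in min_and_max["maximum"]
--                     or attr_name in min_and_max["maximum"]
--                     and attr_value > min_and_max["maximum"][attr_name]
--                 ):
--                     min_and_max["maximum"][attr_name] = attr_value
--
--     return min_and_max
-- ===== SOURCE B (Python) =====
-- def find_minimum_and_maximum(metadata: list):
--     """Group attribute values first, then reduce each group with min/max."""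
--     grouped = {}
--     for metadata_item in metadata:
--         for attr_name, attr_value in metadata_item.items():
--             if attr_name != "object":
--                 grouped.setdefault(attr_name, []).append(attr_value)
--     return {
--         "minimum": {attr: min(values) for attr, values in grouped.items()},
--         "maximum": {attr: max(values) for attr, values in grouped.items()},
--     }
-- ===== Notes on version B (the rewrite author's own statement) =====
-- stated objective: simpler
-- what changed: Replaces the interleaved running-min/running-max updates with conditional overwrites by a group-then-reduce scheme: one pass collects each attribute's values into an ordered dict of lists, then the result is built with min()/max() comprehensions.
import Mathlib
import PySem

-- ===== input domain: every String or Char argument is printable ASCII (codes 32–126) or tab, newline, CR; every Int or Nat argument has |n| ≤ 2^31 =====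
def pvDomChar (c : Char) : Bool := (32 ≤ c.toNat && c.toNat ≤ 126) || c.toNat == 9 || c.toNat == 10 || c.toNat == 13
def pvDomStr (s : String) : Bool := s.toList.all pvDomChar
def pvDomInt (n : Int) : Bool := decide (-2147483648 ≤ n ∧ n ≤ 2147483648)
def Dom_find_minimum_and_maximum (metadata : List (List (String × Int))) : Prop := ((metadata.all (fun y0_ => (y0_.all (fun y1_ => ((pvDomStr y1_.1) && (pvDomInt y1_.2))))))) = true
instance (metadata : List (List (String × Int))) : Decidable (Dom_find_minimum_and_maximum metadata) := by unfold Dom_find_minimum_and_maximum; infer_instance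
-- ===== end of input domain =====

-- B replaces A's interleaved running-min/max conditional overwrites by a group-then-reduce
-- decomposition (collect each attribute's values, then min/max each group); objective: simpler.

-- ===== PORT A =====
-- one inner-loop body of A: conditionally update the running minimum and maximum dicts
def pvStepA (st : PySem.Dict String Int × PySem.Dict String Int) (p : String × Int) :
    PySem.Dict String Int × PySem.Dict String Int :=
  if p.1 ≠ "object" then
    ((if ¬ st.1.contains p.1 = true ∨ (st.1.contains p.1 = true ∧ p.2 < st.1.getD p.1 0)
        then st.1.insert p.1 p.2 else st.1),
     (if ¬ st.2.contains p.1 = true ∨ (st.2.contains p.1 = true ∧ st.2.getD p.1 0 < p.2)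
        then st.2.insert p.1 p.2 else st.2))
  else st

def find_minimum_and_maximum (metadata : List (List (String × Int))) :
    List (String × List (String × Int)) :=
  let st := metadata.foldl (fun st item => item.foldl pvStepA st)
    (PySem.Dict.empty, PySem.Dict.empty)
  [("minimum", st.1.items), ("maximum", st.2.items)]

-- ===== PORT B =====
-- min(vs) / max(vs) of a nonempty list of ints (default never reached on nonempty input)
def pvMin (vs : List Int) : Int := (PySem.List.min? vs id).getD 0
def pvMax (vs : List Int) : Int := (PySem.List.max? vs id).getD 0

-- one inner-loop body of B: grouped.setdefault(attr_name, []).append(attr_value)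
def pvGroupStep (d : PySem.Dict String (List Int)) (p : String × Int) :
    PySem.Dict String (List Int) :=
  if p.1 ≠ "object" then d.modify p.1 [] (· ++ [p.2]) else d

def find_minimum_and_maximum_alt (metadata : List (List (String × Int))) :
    List (String × List (String × Int)) :=
  let grouped := metadata.foldl (fun d item => item.foldl pvGroupStep d) PySem.Dict.empty
  [("minimum", grouped.items.map (fun q => (q.1, pvMin q.2))),
   ("maximum", grouped.items.map (fun q => (q.1, pvMax q.2)))]

-- ===== PRECONDITION & SPEC =====
def Spec_find_minimum_and_maximum (metadata : List (List (String × Int))) (out : List (String × List (String × Int))) : Prop := out = find_minimum_and_maximum_alt metadata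
instance (metadata : List (List (String × Int))) (out : List (String × List (String × Int))) : Decidable (Spec_find_minimum_and_maximum metadata out) := by unfold Spec_find_minimum_and_maximum; infer_instance

-- ===== CLAIM (what is proved, stated in full; the proofs are below) =====
def Claim_equal_find_minimum_and_maximum : Prop := ∀ (metadata : List (List (String × Int))), Dom_find_minimum_and_maximum metadata → Spec_find_minimum_and_maximum metadata (find_minimum_and_maximum metadata)

-- ===== LEMMAS AND PROOFS =====

-- the coupling invariant between A's pair of running dicts and B's grouping dict
def pvInv (st : PySem.Dict String Int × PySem.Dict String Int)
    (g : PySem.Dict String (List Int)) : Prop :=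
  g.keys.Nodup ∧ (∀ q ∈ g.items, q.2 ≠ []) ∧
  st.1.items = g.items.map (fun q => (q.1, pvMin q.2)) ∧
  st.2.items = g.items.map (fun q => (q.1, pvMax q.2))

-- minimum of a nonempty list a :: t as a plain fold (proof-side helper)
def myMin (a : Int) (t : List Int) : Int := t.foldl (fun m x => if x < m then x else m) a
def myMax (a : Int) (t : List Int) : Int := t.foldl (fun m x => if m < x then x else m) a

theorem min?_cons_cons (a x : Int) (t : List Int) :
    PySem.List.min? (a :: x :: t) id = PySem.List.min? ((if x < a then x else a) :: t) id := by
  by_cases hx : x < a <;> simp [PySem.List.min?, hx]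

theorem max?_cons_cons (a x : Int) (t : List Int) :
    PySem.List.max? (a :: x :: t) id = PySem.List.max? ((if a < x then x else a) :: t) id := by
  by_cases hx : a < x <;> simp [PySem.List.max?, hx]

theorem min?_cons (a : Int) (t : List Int) :
    PySem.List.min? (a :: t) id = some (myMin a t) := by
  induction t generalizing a with
  | nil => rfl
  | cons x t ih =>
    rw [min?_cons_cons, ih]
    by_cases hx : x < a <;> simp [myMin, hx]

theorem max?_cons (a : Int) (t : List Int) :
    PySem.List.max? (a :: t) id = some (myMax a t) := by
  induction t generalizing a with
  | nil => rfl
  | cons x t ih =>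
    rw [max?_cons_cons, ih]
    by_cases hx : a < x <;> simp [myMax, hx]

theorem pvMin_append_singleton (vs : List Int) (v : Int) (h : vs ≠ []) :
    pvMin (vs ++ [v]) = if v < pvMin vs then v else pvMin vs := by
  cases vs with
  | nil => exact absurd rfl h
  | cons a t =>
    rw [pvMin, pvMin, List.cons_append, min?_cons, min?_cons]
    simp only [Option.getD_some, myMin, List.foldl_append, List.foldl_cons, List.foldl_nil]

theorem pvMax_append_singleton (vs : List Int) (v : Int) (h : vs ≠ []) :
    pvMax (vs ++ [v]) = if pvMax vs < v then v else pvMax vs := by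
  cases vs with
  | nil => exact absurd rfl h
  | cons a t =>
    rw [pvMax, pvMax, List.cons_append, max?_cons, max?_cons]
    simp only [Option.getD_some, myMax, List.foldl_append, List.foldl_cons, List.foldl_nil]

-- with unique keys, the entry at key k is unique in the items list
theorem pv_entry_unique {g : PySem.Dict String (List Int)} (hnd : g.keys.Nodup)
    {k : String} {vs : List Int} (hmem : (k, vs) ∈ g.items)
    {q : String × List Int} (hq : q ∈ g.items) (hk : q.1 = k) : q = (k, vs) := by
  have h1 := PySem.Dict.get?_of_mem_items g hmem hnd
  have h2 := PySem.Dict.get?_of_mem_items g (show (q.1, q.2) ∈ g.items from hq) hnd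
  rw [hk, h1] at h2
  obtain ⟨q1, q2⟩ := q
  cases h2
  simp only at hk
  rw [hk]

theorem pvInv_step (st : PySem.Dict String Int × PySem.Dict String Int)
    (g : PySem.Dict String (List Int)) (p : String × Int) (h : pvInv st g) :
    pvInv (pvStepA st p) (pvGroupStep g p) := by
  obtain ⟨hnd, hne, hmin, hmax⟩ := h
  obtain ⟨k, v⟩ := p
  by_cases hk : k = "object"
  · subst hk
    simp only [pvStepA, pvGroupStep, ne_eq, not_true_eq_false, if_false]
    exact ⟨hnd, hne, hmin, hmax⟩
  have hkeys1 : st.1.keys = g.keys := by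
    simp only [PySem.Dict.keys, hmin, List.map_map]
    rfl
  have hkeys2 : st.2.keys = g.keys := by
    simp only [PySem.Dict.keys, hmax, List.map_map]
    rfl
  have hnd1 : st.1.keys.Nodup := hkeys1 ▸ hnd
  have hnd2 : st.2.keys.Nodup := hkeys2 ▸ hnd
  have hc1 : st.1.contains k = g.contains k := by
    simp [PySem.Dict.contains_eq_decide_mem_keys, hkeys1]
  have hc2 : st.2.contains k = g.contains k := by
    simp [PySem.Dict.contains_eq_decide_mem_keys, hkeys2]
  unfold pvInv pvStepA pvGroupStep
  simp only [ne_eq, hk, not_false_eq_true, if_true]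
  by_cases hgc : g.contains k = true
  · -- key already grouped: A compares against the running extremum = extremum of the group
    have hkmem : k ∈ List.map Prod.fst g.items := (PySem.Dict.contains_iff_mem_keys g k).mp hgc
    obtain ⟨q0, hq0, hq0k⟩ := List.mem_map.mp hkmem
    obtain ⟨k', vs⟩ := q0
    simp only at hq0k
    have hkk := hq0k.symm
    subst hkk
    have hvs_ne : vs ≠ [] := hne _ hq0
    have hgetDg : g.getD k [] = vs := PySem.Dict.getD_of_mem_items g hq0 hnd []
    have hg' : g.modify k [] (· ++ [v]) = g.insert k (vs ++ [v]) := by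
      rw [PySem.Dict.modify, hgetDg]
    have hitems' : (g.insert k (vs ++ [v])).items
        = g.items.map (fun q => if q.1 == k then (k, vs ++ [v]) else q) :=
      PySem.Dict.items_insert_of_contains g (vs ++ [v]) hgc
    have hmem1 : (k, pvMin vs) ∈ st.1.items := by
      rw [hmin]; exact List.mem_map_of_mem hq0
    have hmem2 : (k, pvMax vs) ∈ st.2.items := by
      rw [hmax]; exact List.mem_map_of_mem hq0
    have hgetD1 : st.1.getD k 0 = pvMin vs := PySem.Dict.getD_of_mem_items st.1 hmem1 hnd1 0
    have hgetD2 : st.2.getD k 0 = pvMax vs := PySem.Dict.getD_of_mem_items st.2 hmem2 hnd2 0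
    refine ⟨?_, ?_, ?_, ?_⟩
    · rw [hg']; exact PySem.Dict.nodup_keys_insert g k (vs ++ [v]) hnd
    · rw [hg', hitems']
      intro q hq
      obtain ⟨q1, hq1, rfl⟩ := List.mem_map.mp hq
      by_cases hq1k : q1.1 = k <;> simp [hq1k]
      · exact hne _ hq1
    · -- minimum side
      rw [hg', hitems', hgetD1]
      by_cases hv : v < pvMin vs
      · rw [if_pos (Or.inr ⟨by rw [hc1]; exact hgc, hv⟩)]
        rw [PySem.Dict.items_insert_of_contains st.1 v (by rw [hc1]; exact hgc), hmin,
          List.map_map, List.map_map]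
        refine List.map_congr_left (fun q hq => ?_)
        by_cases hqk : q.1 = k
        · simp only [Function.comp, hqk, beq_self_eq_true, if_true,
            pvMin_append_singleton vs v hvs_ne, if_pos hv]
        · simp [Function.comp, hqk]
      · rw [if_neg (fun hor => hor.elim (fun hcon => hcon (by rw [hc1]; exact hgc)) (fun hand => hv hand.2))]
        rw [hmin, List.map_map]
        refine List.map_congr_left (fun q hq => ?_)
        by_cases hqk : q.1 = k
        · have hq_eq : q = (k, vs) := pv_entry_unique hnd hq0 hq hqk
          subst hq_eq
          simp only [Function.comp, beq_self_eq_true, if_true,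
            pvMin_append_singleton vs v hvs_ne, if_neg hv]
        · simp [Function.comp, hqk]
    · -- maximum side
      rw [hg', hitems', hgetD2]
      by_cases hv : pvMax vs < v
      · rw [if_pos (Or.inr ⟨by rw [hc2]; exact hgc, hv⟩)]
        rw [PySem.Dict.items_insert_of_contains st.2 v (by rw [hc2]; exact hgc), hmax,
          List.map_map, List.map_map]
        refine List.map_congr_left (fun q hq => ?_)
        by_cases hqk : q.1 = k
        · simp only [Function.comp, hqk, beq_self_eq_true, if_true,
            pvMax_append_singleton vs v hvs_ne, if_pos hv]
        · simp [Function.comp, hqk]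
      · rw [if_neg (fun hor => hor.elim (fun hcon => hcon (by rw [hc2]; exact hgc)) (fun hand => hv hand.2))]
        rw [hmax, List.map_map]
        refine List.map_congr_left (fun q hq => ?_)
        by_cases hqk : q.1 = k
        · have hq_eq : q = (k, vs) := pv_entry_unique hnd hq0 hq hqk
          subst hq_eq
          simp only [Function.comp, beq_self_eq_true, if_true,
            pvMax_append_singleton vs v hvs_ne, if_neg hv]
        · simp [Function.comp, hqk]
  · -- fresh key: everything appends
    have hgc' : g.contains k = false := by simpa using hgc
    have hgetDg : g.getD k [] = [] := PySem.Dict.getD_of_not_contains g [] hgc'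
    have hg' : g.modify k [] (· ++ [v]) = g.insert k [v] := by
      rw [PySem.Dict.modify, hgetDg, List.nil_append]
    have hitems' : (g.insert k [v]).items = g.items ++ [(k, [v])] :=
      PySem.Dict.items_insert_of_not_contains g [v] hgc'
    have hcond1 : ¬ st.1.contains k = true := by rw [hc1, hgc']; simp
    have hcond2 : ¬ st.2.contains k = true := by rw [hc2, hgc']; simp
    refine ⟨?_, ?_, ?_, ?_⟩
    · rw [hg']; exact PySem.Dict.nodup_keys_insert g k [v] hnd
    · rw [hg', hitems']
      intro q hq
      rcases List.mem_append.mp hq with hq | hq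
      · exact hne _ hq
      · simp at hq; subst hq; simp
    · rw [if_pos (Or.inl hcond1), hg', hitems',
        PySem.Dict.items_insert_of_not_contains st.1 v (by simpa using hcond1),
        List.map_append, hmin]
      rfl
    · rw [if_pos (Or.inl hcond2), hg', hitems',
        PySem.Dict.items_insert_of_not_contains st.2 v (by simpa using hcond2),
        List.map_append, hmax]
      rfl

theorem pvInv_foldl (l : List (String × Int))
    (st : PySem.Dict String Int × PySem.Dict String Int)
    (g : PySem.Dict String (List Int)) (h : pvInv st g) :
    pvInv (l.foldl pvStepA st) (l.foldl pvGroupStep g) := by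
  induction l generalizing st g with
  | nil => exact h
  | cons p t ih => exact ih _ _ (pvInv_step st g p h)

-- ===== VERDICT (by name: the statement is the Claim_ definition above) =====
theorem find_minimum_and_maximum_spec : Claim_equal_find_minimum_and_maximum := by
  intro metadata _
  unfold Spec_find_minimum_and_maximum find_minimum_and_maximum find_minimum_and_maximum_alt
  have h1 : metadata.foldl (fun st item => item.foldl pvStepA st)
      (PySem.Dict.empty, PySem.Dict.empty)
      = metadata.flatten.foldl pvStepA (PySem.Dict.empty, PySem.Dict.empty) :=
    List.foldl_flatten.symm
  have h2 : metadata.foldl (fun d item => item.foldl pvGroupStep d) PySem.Dict.empty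
      = metadata.flatten.foldl pvGroupStep PySem.Dict.empty :=
    List.foldl_flatten.symm
  have hbase : pvInv (PySem.Dict.empty, PySem.Dict.empty) PySem.Dict.empty := by
    refine ⟨?_, ?_, rfl, rfl⟩ <;> simp [PySem.Dict.empty, PySem.Dict.keys]
  have hinv := pvInv_foldl metadata.flatten _ _ hbase
  simp only [h1, h2]
  obtain ⟨-, -, hmin, hmax⟩ := hinv
  simp [hmin, hmax]
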